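-- pv_equiv track=rewrite | github.com/xarturhax/Aois | lab3/karno.py | reorder_gray_code
-- ===== SOURCE A (Python) =====
-- def reorder_gray_code(combinations):
--     result = [combinations[0]]
--     for i in range(1, len(combinations)):
--         prev = result[-1]
--         for comb in combinations:
--             if comb not in result and sum(a != b for a, b in zip(prev, comb)) == 1:
--                 result.append(comb)
--                 break
--     return result
-- ===== SOURCE B (Python) =====
-- def reorder_gray_code(combinations):
--     n = len(combinations)
--     # adjacency by index: for each i, indices j (in original order) whose
--     # combination differs from combinations[i] in exactly one zipped position
--     adj = [[j for j in range(n)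
--             if sum(a != b for a, b in zip(combinations[i], combinations[j])) == 1]
--            for i in range(n)]
--     result = [combinations[0]]
--     last = 0
--     for _ in range(n - 1):
--         for j in adj[last]:
--             if combinations[j] not in result:
--                 result.append(combinations[j])
--                 last = j
--                 break
--     return result
-- ===== Notes on version B (the rewrite author's own statement) =====
-- stated objective: alternative
-- what changed: B precomputes an index-keyed adjacency table (for each index i, the indices in original order whose combination differs by exactly one zipped position) and then walks it, appending the first neighbor of the last-appended index not yet in the result, instead of A's per-step rescan of all combinations recomputing differences against the current tail.
import Mathlib
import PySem

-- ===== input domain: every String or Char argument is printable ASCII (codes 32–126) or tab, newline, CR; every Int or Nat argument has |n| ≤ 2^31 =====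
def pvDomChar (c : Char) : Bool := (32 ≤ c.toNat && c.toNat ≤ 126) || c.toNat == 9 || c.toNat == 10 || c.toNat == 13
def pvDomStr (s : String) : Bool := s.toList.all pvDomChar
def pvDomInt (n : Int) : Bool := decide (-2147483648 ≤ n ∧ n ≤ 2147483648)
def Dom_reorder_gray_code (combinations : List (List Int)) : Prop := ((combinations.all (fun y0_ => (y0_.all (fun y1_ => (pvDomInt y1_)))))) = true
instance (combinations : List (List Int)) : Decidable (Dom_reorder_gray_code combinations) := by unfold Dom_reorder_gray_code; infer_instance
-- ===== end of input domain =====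

-- B replaces A's per-step rescan of all combinations (recomputing the one-position
-- difference test against the current tail each step) by a precomputed index-keyed
-- adjacency table walked from the last-appended index; same result, alternative structure.

-- ===== PORT A =====
-- sum(a != b for a, b in zip(x, y)) == 1
def pvDiff1 (x y : List Int) : Bool := ((x.zip y).countP (fun p => p.1 != p.2)) == 1

def reorder_gray_code (combinations : List (List Int)) : List (List Int) :=
  match combinations with
  | [] => []            -- Python: combinations[0] raises IndexError here; excluded by Pre_
  | c0 :: _ =>
    (PySem.List.pyRange 1 (combinations.length : Int) 1).foldl
      (fun result _ =>
        -- prev = result[-1]; result is never empty here, so getLast?.getD is exact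
        let prev := (result.getLast?).getD []
        -- inner for-with-break = first comb satisfying the condition, if any
        match combinations.find? (fun comb => !(result.contains comb) && pvDiff1 prev comb) with
        | some comb => result ++ [comb]
        | none => result)
      [c0]

-- ===== PORT B =====
def reorder_gray_code_alt (combinations : List (List Int)) : List (List Int) :=
  match combinations with
  | [] => []            -- Python: combinations[0] raises IndexError here; excluded by Pre_
  | c0 :: _ =>
    let n := combinations.length
    -- adj[i] = [j for j in range(n) if one-position difference between combos i and j]
    let adj : List (List Nat) :=
      (List.range n).map (fun i =>
        (List.range n).filter (fun j => pvDiff1 (combinations.getD i []) (combinations.getD j [])))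
    -- state = (result, last); inner for-with-break = first unused neighbor index
    let step : (List (List Int) × Nat) → Nat → (List (List Int) × Nat) :=
      fun st _ =>
        match (adj.getD st.2 []).find? (fun j => !(st.1.contains (combinations.getD j []))) with
        | some j => (st.1 ++ [combinations.getD j []], j)
        | none => st
    ((List.range (n - 1)).foldl step ([c0], 0)).1

-- ===== PRECONDITION & SPEC =====
-- Pre_ excludes only the empty list, on which the Python A raises IndexError at combinations[0].
def Pre_reorder_gray_code (combinations : List (List Int)) : Prop := combinations ≠ []
instance (combinations : List (List Int)) : Decidable (Pre_reorder_gray_code combinations) := by unfold Pre_reorder_gray_code; infer_instance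
def pvWitness_reorder_gray_code : List (List Int) := [[0, 0], [1, 1], [0, 1]]

def Spec_reorder_gray_code (combinations : List (List Int)) (out : List (List Int)) : Prop := out = reorder_gray_code_alt combinations
instance (combinations : List (List Int)) (out : List (List Int)) : Decidable (Spec_reorder_gray_code combinations out) := by unfold Spec_reorder_gray_code; infer_instance

-- ===== CLAIM (what is proved, stated in full; the proofs are below) =====
def Claim_equal_reorder_gray_code : Prop := ∀ (combinations : List (List Int)), Dom_reorder_gray_code combinations → Pre_reorder_gray_code combinations → Spec_reorder_gray_code combinations (reorder_gray_code combinations)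

-- ===== LEMMAS AND PROOFS =====

theorem succ_getD {α β : Type} (x : α) (tl : List α) (d : α) (p : α → β) :
    ((fun j => p ((x :: tl).getD j d)) ∘ Nat.succ) = fun j => p (tl.getD j d) := by
  funext j; simp

-- B's find-first over a filtered index range corresponds exactly to A's find-first over
-- the values: same success/failure, and on success the index is in range and indexes
-- the very value A finds (first-match agreement even with duplicate values).
theorem find_idx_val {α : Type} [BEq α] (xs : List α) (p q : α → Bool) (d : α) :
    (match ((List.range xs.length).filter (fun j => p (xs.getD j d))).find?
             (fun j => q (xs.getD j d)) with
     | some j => j < xs.length ∧ xs.find? (fun x => q x && p x) = some (xs.getD j d)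
     | none   => xs.find? (fun x => q x && p x) = none) := by
  induction xs with
  | nil => simp
  | cons x tl ih =>
    rw [List.length_cons, List.range_succ_eq_map, List.filter_cons, List.filter_map,
        succ_getD x tl d p]
    simp only [List.getD_cons_zero]
    by_cases hp : p x
    · rw [if_pos hp]
      rw [List.find?_cons]
      by_cases hq : q x
      · simp [hq, hp]
      · have hq' : q x = false := by simp [hq]
        simp only [List.getD_cons_zero, hq']
        rw [List.find?_map, succ_getD x tl d q]
        cases hfind : ((List.range tl.length).filter (fun j => p (tl.getD j d))).find?
            (fun j => q (tl.getD j d)) with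
        | some j =>
          have := ih; rw [hfind] at this
          simp only [Option.map_some, Nat.succ_eq_add_one, List.getD_cons_succ]
          exact ⟨by omega, by simp [hq, this.2]⟩
        | none =>
          have := ih; rw [hfind] at this
          simp [hq, hp, this]
    · rw [if_neg hp, List.find?_map, succ_getD x tl d q]
      cases hfind : ((List.range tl.length).filter (fun j => p (tl.getD j d))).find?
          (fun j => q (tl.getD j d)) with
      | some j =>
        have := ih; rw [hfind] at this
        simp only [Option.map_some, Nat.succ_eq_add_one, List.getD_cons_succ]
        exact ⟨by omega, by simp [hp, this.2]⟩
      | none =>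
        have := ih; rw [hfind] at this
        simp [hp, this]

-- A's loop body and B's loop body over a fixed combinations list cs (proof-local names)
def stepA (cs : List (List Int)) (result : List (List Int)) : List (List Int) :=
  let prev := (result.getLast?).getD []
  match cs.find? (fun comb => !(result.contains comb) && pvDiff1 prev comb) with
  | some comb => result ++ [comb]
  | none => result

def stepB (cs : List (List Int)) (st : List (List Int) × Nat) : List (List Int) × Nat :=
  match (((List.range cs.length).map (fun i =>
        (List.range cs.length).filter (fun j => pvDiff1 (cs.getD i []) (cs.getD j [])))).getD st.2 []).find?
      (fun j => !(st.1.contains (cs.getD j []))) with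
  | some j => (st.1 ++ [cs.getD j []], j)
  | none => st

-- loop invariant: B's index is in range and indexes the value at A's result tail
def pvInv (cs : List (List Int)) (st : List (List Int) × Nat) : Prop :=
  st.1.getLast? = some (cs.getD st.2 []) ∧ st.2 < cs.length

theorem step_agree (cs : List (List Int)) (st : List (List Int) × Nat) (h : pvInv cs st) :
    stepA cs st.1 = (stepB cs st).1 ∧ pvInv cs (stepB cs st) := by
  obtain ⟨hlast, hlt⟩ := h
  unfold stepA stepB
  rw [PySem.List.getD_map_range _ _ _ _ hlt]
  have hprev : (st.1.getLast?).getD [] = cs.getD st.2 [] := by rw [hlast]; rfl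
  rw [hprev]
  have key := find_idx_val cs (fun y => pvDiff1 (cs.getD st.2 []) y)
      (fun y => !(st.1.contains y)) []
  cases hfind : ((List.range cs.length).filter
      (fun j => pvDiff1 (cs.getD st.2 []) (cs.getD j []))).find?
      (fun j => !(st.1.contains (cs.getD j []))) with
  | some j =>
    rw [hfind] at key
    refine ⟨by simp only [key.2], ⟨by simp, key.1⟩⟩
  | none =>
    rw [hfind] at key
    exact ⟨by simp only [key], ⟨hlast, hlt⟩⟩

theorem loop_agree (cs : List (List Int)) (la : List Int) (lb : List Nat)
    (hlen : la.length = lb.length) (st : List (List Int) × Nat) (h : pvInv cs st) :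
    la.foldl (fun r _ => stepA cs r) st.1 = ((lb.foldl (fun s _ => stepB cs s) st)).1 := by
  induction la generalizing lb st with
  | nil => cases lb with
    | nil => rfl
    | cons b bs => simp at hlen
  | cons a as ih =>
    cases lb with
    | nil => simp at hlen
    | cons b bs =>
      simp only [List.foldl_cons]
      obtain ⟨heq, hinv⟩ := step_agree cs st h
      rw [heq]
      exact ih bs (by simpa using hlen) (stepB cs st) hinv

-- ===== VERDICT (by name: the statement is the Claim_ definition above) =====
theorem reorder_gray_code_spec : Claim_equal_reorder_gray_code := by
  intro cs _ hpre
  unfold Spec_reorder_gray_code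
  cases cs with
  | nil => exact absurd rfl hpre
  | cons c0 rest =>
    have hA : reorder_gray_code (c0 :: rest)
        = (PySem.List.pyRange 1 ((c0 :: rest).length : Int) 1).foldl
            (fun r _ => stepA (c0 :: rest) r) [c0] := rfl
    have hB : reorder_gray_code_alt (c0 :: rest)
        = ((List.range ((c0 :: rest).length - 1)).foldl
            (fun s _ => stepB (c0 :: rest) s) ([c0], 0)).1 := rfl
    rw [hA, hB]
    exact loop_agree (c0 :: rest) _ _ (by simp [PySem.List.length_pyRange_one]) ([c0], 0)
      ⟨by simp, by simp⟩
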